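-- pv_equiv track=rewrite | github.com/lucaryholt/python_elective | 36/exercises.py | sToL
-- ===== SOURCE A (Python) =====
-- def sToL(x):
--     vowels = ['a','e','y','u','i','o','å','æ','ø']
--     li = []
--     for i in x:
--         if i not in vowels:
--             li.append(i)
--     li = sorted(li)
--     return li
-- ===== SOURCE B (Python) =====
-- def _merge(a, b):
--     out = []
--     i = j = 0
--     while i < len(a) and j < len(b):
--         if a[i] <= b[j]:
--             out.append(a[i]); i += 1
--         else:
--             out.append(b[j]); j += 1
--     return out + a[i:] + b[j:]
--
-- def _msort(l):
--     if len(l) < 2: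
--         return l
--     mid = len(l) // 2
--     return _merge(_msort(l[:mid]), _msort(l[mid:]))
--
-- def sToL(x):
--     vowels = ('a','e','y','u','i','o','å','æ','ø')
--     return _msort([c for c in x if c not in vowels])
-- ===== Notes on version B (the rewrite author's own statement) =====
-- stated objective: alternative
-- what changed: B filters the consonants in a single comprehension and sorts them with a hand-written top-down merge sort (recursive split at the midpoint plus a two-front merge) instead of appending in a loop and calling the built-in comparison sort.
import Mathlib
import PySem

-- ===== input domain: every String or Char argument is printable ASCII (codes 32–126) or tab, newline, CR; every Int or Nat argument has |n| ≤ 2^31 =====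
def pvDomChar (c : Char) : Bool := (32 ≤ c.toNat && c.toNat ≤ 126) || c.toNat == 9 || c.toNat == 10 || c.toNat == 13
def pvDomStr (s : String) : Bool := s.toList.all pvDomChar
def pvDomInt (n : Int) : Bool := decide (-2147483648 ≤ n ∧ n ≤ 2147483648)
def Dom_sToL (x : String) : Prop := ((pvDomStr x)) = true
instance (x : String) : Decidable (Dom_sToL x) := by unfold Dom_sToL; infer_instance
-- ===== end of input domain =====

-- B filters the consonants in one comprehension and sorts them with a hand-written
-- merge sort instead of the built-in comparison sort; same return value as A.


-- ===== PORT A =====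
-- Python's 1-char strings compare by code point, exactly as Char here, so the loop is
-- over chars and the result chars are wrapped as 1-char strings at the end (exact).
def sToL (x : String) : List String :=
  let vowels : List Char := ['a','e','y','u','i','o','å','æ','ø']
  let li := x.toList.foldl (fun acc i => if i ∉ vowels then acc ++ [i] else acc) []
  (PySem.List.sorted li (fun c => c) false).map (fun c => String.ofList [c])

-- ===== PORT B =====
-- _merge's while-loop walks the fronts of a and b and flushes the leftovers; its
-- structural-recursion reading over the two lists is exact.
def pvMerge : List Char → List Char → List Char
  | [], b => b
  | a, [] => a
  | p :: a, q :: b => if p ≤ q then p :: pvMerge a (q :: b) else q :: pvMerge (p :: a) b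

-- _msort: split at len//2, sort halves, merge
def pvMsort (l : List Char) : List Char :=
  if _h : l.length < 2 then l
  else
    let mid := l.length / 2
    pvMerge (pvMsort (l.take mid)) (pvMsort (l.drop mid))
termination_by l.length
decreasing_by
  · simp only [List.length_take]; omega
  · simp only [List.length_drop]; omega

def sToL_alt (x : String) : List String :=
  let vowels : List Char := ['a','e','y','u','i','o','å','æ','ø']
  (pvMsort (x.toList.filter (fun c => c ∉ vowels))).map (fun c => String.ofList [c])

-- ===== PRECONDITION & SPEC =====
def Spec_sToL (x : String) (out : List String) : Prop := out = sToL_alt x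
instance (x : String) (out : List String) : Decidable (Spec_sToL x out) := by unfold Spec_sToL; infer_instance

-- ===== CLAIM (what is proved, stated in full; the proofs are below) =====
def Claim_equal_sToL : Prop := ∀ (x : String), Dom_sToL x → Spec_sToL x (sToL x)

-- ===== LEMMAS AND PROOFS =====

lemma pvMerge_perm (a b : List Char) : (pvMerge a b).Perm (a ++ b) := by
  fun_induction pvMerge a b with
  | case1 b => simp [List.Perm.refl]
  | case2 a => simp
  | case3 p a q b h ih => simpa using ih.cons p
  | case4 p a q b h ih =>
    refine ((ih.cons q).trans ?_)
    refine (List.Perm.swap p q (a ++ b)).trans ?_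
    exact (List.perm_middle.symm).cons p

lemma pvMerge_pairwise (a b : List Char)
    (ha : a.Pairwise (· ≤ ·)) (hb : b.Pairwise (· ≤ ·)) :
    (pvMerge a b).Pairwise (· ≤ ·) := by
  fun_induction pvMerge a b with
  | case1 b => exact hb
  | case2 a => exact ha
  | case3 p a q b h ih =>
    rw [List.pairwise_cons]
    refine ⟨?_, ih ha.of_cons hb⟩
    intro c hc
    have hc' : c ∈ a ++ q :: b := (pvMerge_perm a (q :: b)).mem_iff.mp hc
    rcases List.mem_append.mp hc' with h1 | h1
    · exact (List.pairwise_cons.mp ha).1 c h1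
    · rcases List.mem_cons.mp h1 with rfl | h2
      · exact h
      · exact le_trans h ((List.pairwise_cons.mp hb).1 c h2)
  | case4 p a q b h ih =>
    rw [List.pairwise_cons]
    refine ⟨?_, ih ha hb.of_cons⟩
    intro c hc
    have hq : q ≤ p := le_of_not_ge (by simpa using h)
    have hc' : c ∈ p :: a ++ b := (pvMerge_perm (p :: a) b).mem_iff.mp hc
    rcases List.mem_append.mp hc' with h1 | h1
    · rcases List.mem_cons.mp h1 with rfl | h2
      · exact hq
      · exact le_trans hq ((List.pairwise_cons.mp ha).1 c h2)
    · exact (List.pairwise_cons.mp hb).1 c h1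

lemma pvMsort_perm (l : List Char) : (pvMsort l).Perm l := by
  fun_induction pvMsort l with
  | case1 l h => exact List.Perm.refl l
  | case2 l h mid ih1 ih2 =>
    refine (pvMerge_perm _ _).trans ?_
    refine (ih1.append ih2).trans ?_
    rw [List.take_append_drop]

lemma pvMsort_pairwise (l : List Char) : (pvMsort l).Pairwise (· ≤ ·) := by
  fun_induction pvMsort l with
  | case1 l h =>
    match l, h with
    | [], _ => simp
    | [c], _ => simp
  | case2 l h mid ih1 ih2 => exact pvMerge_pairwise _ _ ih1 ih2

-- ===== VERDICT (by name: the statement is the Claim_ definition above) =====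
theorem sToL_spec : Claim_equal_sToL := by
  intro x _
  unfold Spec_sToL sToL sToL_alt
  simp only
  rw [PySem.List.foldl_append_ite_eq_filter, List.nil_append]
  congr 1
  exact PySem.List.sorted_id_eq_of_perm_of_pairwise _ _
    (pvMsort_perm _) (pvMsort_pairwise _)
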